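-- pv_equiv track=rewrite | github.com/musken/realestate | hemnetScan.py | htmlParser
-- ===== SOURCE A (Python) =====
-- def htmlParser(enc, text):
-- 	occ = 0
--
-- 	for i in range(0, len(text)-1):
-- 		if(text[i:(i+len(enc)+1)] == ('<'+enc)):
-- 			occ += 1;
-- 		elif(text[i:(i+len(enc)+2)] == ('</' + enc)):
-- 			if(occ == 0):
-- 				return [text[:(i-1)], text[(i):]]
-- 			else:
-- 				occ -= 1
-- 	return [text]
-- ===== SOURCE B (Python) =====
-- def _find_all(text, needle, limit):
--     out = []
--     pos = text.find(needle)
--     while pos != -1 and pos < limit: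
--         out.append(pos)
--         pos = text.find(needle, pos + 1)
--     return out
--
--
-- def htmlParser(enc, text):
--     limit = len(text) - 1
--     opens = _find_all(text, '<' + enc, limit)
--     closes = _find_all(text, '</' + enc, limit)
--     oi = ci = 0
--     bal = 0
--     while ci < len(closes):
--         if oi < len(opens) and opens[oi] <= closes[ci]:
--             if opens[oi] == closes[ci]:
--                 ci += 1
--             oi += 1
--             bal += 1
--         elif bal == 0:
--             c = closes[ci]
--             return [text[:(c - 1)], text[c:]]
--         else:
--             bal -= 1
--             ci += 1
--     return [text]
-- ===== Notes on version B (the rewrite author's own statement) =====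
-- stated objective: faster
-- what changed: A's single interleaved char-by-char balance scan (which builds a fresh slice and pattern string at every index) is replaced by building two position indices with repeated str.find (all open-tag and all close-tag positions below the limit) and then resolving the balance in a two-pointer merge of the two sorted index lists.
import Mathlib
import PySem

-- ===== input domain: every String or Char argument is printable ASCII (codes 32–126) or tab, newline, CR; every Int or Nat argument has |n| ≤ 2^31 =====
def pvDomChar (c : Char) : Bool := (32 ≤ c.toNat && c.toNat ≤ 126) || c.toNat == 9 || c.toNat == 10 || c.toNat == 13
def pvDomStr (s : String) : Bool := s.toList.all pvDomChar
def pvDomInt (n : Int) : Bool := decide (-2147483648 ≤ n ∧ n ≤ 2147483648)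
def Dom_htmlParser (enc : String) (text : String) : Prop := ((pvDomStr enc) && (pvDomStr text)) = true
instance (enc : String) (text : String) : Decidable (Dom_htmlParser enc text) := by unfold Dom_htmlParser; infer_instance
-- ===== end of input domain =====

-- B replaces A's interleaved char-by-char balance scan by two find()-built position
-- indices (open tags / close tags) followed by a two-pointer merge; objective: alternative
-- decomposition (and a constant-factor speedup in Python from C-level str.find).

-- ===== PORT A =====
-- the for-loop of A: indices list, occ accumulator; some = early return, none = fall through
def pvALoop (e t : List Char) : List Int → Int → Option (List String)
  | [], _ => none
  | i :: rest, occ =>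
    if PySem.List.slice t (some i) (some (i + ((e.length : Int) + 1))) = '<' :: e then
      pvALoop e t rest (occ + 1)
    else if PySem.List.slice t (some i) (some (i + ((e.length : Int) + 2))) = '<' :: '/' :: e then
      if occ = 0 then
        some [String.ofList (PySem.List.slice t none (some (i - 1))),
              String.ofList (PySem.List.slice t (some i) none)]
      else pvALoop e t rest (occ - 1)
    else pvALoop e t rest occ

def htmlParser (enc : String) (text : String) : List String :=
  match pvALoop enc.toList text.toList
      (PySem.List.pyRange 0 ((text.toList.length : Int) - 1) 1) 0 with
  | some r => r
  | none => [text]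

-- ===== PORT B =====
-- _find_all's while loop: repeated str.find; fuel t.length+1 bounds the iterations
-- (each found position is ≥ previous+1 and < limit ≤ t.length, so fuel never runs out)
def pvFindAllGo (t needle : List Char) (limit : Int) : Int → Nat → List Int
  | _, 0 => []
  | pos, fuel + 1 =>
    if pos ≠ -1 ∧ pos < limit then
      pos :: pvFindAllGo t needle limit (PySem.Chars.findFrom t needle (pos + 1) none) fuel
    else []

def pvFindAll (t needle : List Char) (limit : Int) : List Int :=
  pvFindAllGo t needle limit (PySem.Chars.find t needle) (t.length + 1)

-- the two-pointer while loop of B: consumes list heads where Source B advances oi/ci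
def pvMerge (t : List Char) : List Int → List Int → Int → Option (List String)
  | _, [], _ => none
  | [], c :: cs, bal =>
    if bal = 0 then
      some [String.ofList (PySem.List.slice t none (some (c - 1))),
            String.ofList (PySem.List.slice t (some c) none)]
    else pvMerge t [] cs (bal - 1)
  | o :: os, c :: cs, bal =>
    if o ≤ c then
      pvMerge t os (if o = c then cs else c :: cs) (bal + 1)
    else if bal = 0 then
      some [String.ofList (PySem.List.slice t none (some (c - 1))),
            String.ofList (PySem.List.slice t (some c) none)]
    else pvMerge t (o :: os) cs (bal - 1)
termination_by os cs _ => os.length + cs.length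
decreasing_by
  all_goals (try split) <;> (simp only [List.length_cons, List.length_nil]; omega)

def htmlParser_alt (enc : String) (text : String) : List String :=
  match pvMerge text.toList
      (pvFindAll text.toList ('<' :: enc.toList) ((text.toList.length : Int) - 1))
      (pvFindAll text.toList ('<' :: '/' :: enc.toList) ((text.toList.length : Int) - 1)) 0 with
  | some r => r
  | none => [text]

-- ===== PRECONDITION & SPEC =====
def Spec_htmlParser (enc : String) (text : String) (out : List String) : Prop := out = htmlParser_alt enc text
instance (enc : String) (text : String) (out : List String) : Decidable (Spec_htmlParser enc text out) := by unfold Spec_htmlParser; infer_instance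

-- ===== CLAIM (what is proved, stated in full; the proofs are below) =====
def Claim_equal_htmlParser : Prop := ∀ (enc : String) (text : String), Dom_htmlParser enc text → Spec_htmlParser enc text (htmlParser enc text)

-- ===== LEMMAS AND PROOFS =====

-- A's slice-equality test is a prefix test
lemma pv_slice_eq_iff_prefix (p t : List Char) (s : Nat) :
    (PySem.List.slice t (some (s : Int)) (some ((s : Int) + (p.length : Int))) = p)
      ↔ p.isPrefixOf (t.drop s) = true := by
  rw [PySem.List.slice_natCast_add, List.isPrefixOf_iff_prefix, List.prefix_iff_eq_take]
  exact eq_comm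

-- no match at or after k when the needle is not an infix of the suffix at k
lemma pv_no_match_of_not_infix {sub t : List Char} {k : Nat}
    (h : ¬ sub <:+: t.drop k) {i : Nat} (hk : k ≤ i) : ¬ sub <+: t.drop i := by
  intro hp
  apply h
  have : t.drop i = (t.drop k).drop (i - k) := by
    rw [List.drop_drop]; congr 1; omega
  exact List.infix_iff_prefix_suffix.mpr ⟨t.drop i, hp, this ▸ List.drop_suffix _ _⟩

lemma pv_prefix_lt_length {sub t : List Char} {i : Nat} (hsub : sub ≠ [])
    (h : sub <+: t.drop i) : i < t.length := by
  by_contra hi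
  have : t.drop i = [] := List.drop_eq_nil_of_le (by omega)
  rw [this, List.prefix_nil] at h
  exact hsub h

-- the find-collection loop computes exactly the sorted matching positions below the limit
lemma pv_findAllGo_spec (t sub : List Char) (hsub : sub ≠ []) (M : Nat) :
    ∀ fuel k, k ≤ t.length → t.length + 1 - k ≤ fuel →
      pvFindAllGo t sub (M : Int) (PySem.Chars.findFrom t sub (k : Int) none) fuel
        = ((List.range' k (M - k)).filter (fun i => sub.isPrefixOf (t.drop i))).map
            (fun (i : Nat) => (i : Int)) := by
  intro fuel
  induction fuel with
  | zero => intro k hk hf; omega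
  | succ fuel ih =>
    intro k hk hf
    by_cases hneg : PySem.Chars.findFrom t sub (k : Int) none = -1
    · -- no further match: filter is empty
      rw [hneg]
      have hno : ∀ i : Nat, k ≤ i → ¬ sub <+: t.drop i :=
        fun i hi => pv_no_match_of_not_infix
          ((PySem.Chars.findFrom_natCast_eq_neg_one_iff t sub k hk).mp hneg) hi
      have : ((List.range' k (M - k)).filter (fun i => sub.isPrefixOf (t.drop i))) = [] := by
        rw [List.filter_eq_nil_iff]
        intro a ha
        have := List.mem_range'_1.mp ha
        simp only [List.isPrefixOf_iff_prefix]
        exact fun hp => hno a this.1 hp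
      rw [this]
      simp [pvFindAllGo]
    · obtain ⟨hkr, hpr, hmin⟩ := PySem.Chars.findFrom_natCast_spec t sub k hk hneg
      set r := PySem.Chars.findFrom t sub (k : Int) none with hr
      have hr0 : 0 ≤ r := le_trans (by exact_mod_cast Int.natCast_nonneg k) hkr
      have hrn : r = ((r.toNat : Nat) : Int) := by omega
      have hkrn : k ≤ r.toNat := by omega
      have hrlen : r.toNat < t.length := pv_prefix_lt_length hsub hpr
      -- positions in [k, min M r.toNat) do not match
      have hfilter_lo : ∀ m, m ≤ r.toNat - k →
          ((List.range' k m).filter (fun i => sub.isPrefixOf (t.drop i))) = [] := by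
        intro m hm
        rw [List.filter_eq_nil_iff]
        intro a ha
        have := List.mem_range'_1.mp ha
        simp only [List.isPrefixOf_iff_prefix]
        exact hmin a this.1 (by omega)
      by_cases hlt : r.toNat < M
      · -- found a position below the limit: cons and recurse
        have hcond : r ≠ -1 ∧ r < (M : Int) := ⟨hneg, by omega⟩
        rw [pvFindAllGo, if_pos hcond]
        have hsplit : List.range' k (M - k)
            = List.range' k (r.toNat - k) ++ r.toNat :: List.range' (r.toNat + 1) (M - (r.toNat + 1)) := by
          have h1 := @List.range'_append k (r.toNat - k) ((M - (r.toNat + 1)) + 1) 1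
          have hsum : (r.toNat - k) + ((M - (r.toNat + 1)) + 1) = M - k := by omega
          have hmid : k + 1 * (r.toNat - k) = r.toNat := by omega
          rw [hsum, hmid, List.range'_succ] at h1
          exact h1.symm
        rw [hsplit, List.filter_append, hfilter_lo _ (le_refl _), List.nil_append,
          List.filter_cons, if_pos (by simpa [List.isPrefixOf_iff_prefix] using hpr)]
        have hnext : r + 1 = (((r.toNat + 1 : Nat)) : Int) := by omega
        rw [List.map_cons, hnext,
          ih (r.toNat + 1) (by omega) (by omega)]
        exact congrArg₂ List.cons (by omega) rfl
      · -- match is at/after the limit: loop stops, filter below M is empty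
        have hcond : ¬ (r ≠ -1 ∧ r < (M : Int)) := fun h => absurd h.2 (by omega)
        rw [pvFindAllGo, if_neg hcond]
        rw [hfilter_lo _ (by omega)]
        rfl

lemma pv_findAll_spec (t sub : List Char) (hsub : sub ≠ []) (ht : t ≠ []) :
    pvFindAll t sub ((t.length : Int) - 1)
      = ((List.range' 0 (t.length - 1)).filter (fun i => sub.isPrefixOf (t.drop i))).map
          (fun (i : Nat) => (i : Int)) := by
  have hlen : 0 < t.length := List.length_pos_iff.mpr ht
  have h1 : ((t.length : Int) - 1) = ((t.length - 1 : Nat) : Int) := by omega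
  rw [pvFindAll, h1, ← PySem.Chars.findFrom_zero]
  have := pv_findAllGo_spec t sub hsub (t.length - 1) (t.length + 1) 0
    (by omega) (by omega)
  simpa using this

-- merge steps when the head open position is strictly below every close position
lemma pv_merge_skip_open (t : List Char) (o : Int) (os cs : List Int) (bal : Int)
    (h : ∀ c ∈ cs, o < c) :
    pvMerge t (o :: os) cs bal = pvMerge t os cs (bal + 1) := by
  cases cs with
  | nil => simp [pvMerge]
  | cons c cs' =>
    have hlt := h c List.mem_cons_self
    rw [pvMerge, if_pos (le_of_lt hlt), if_neg (by omega)]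

-- merge steps when the head close position is strictly below every open position
lemma pv_merge_close (t : List Char) (opens : List Int) (c : Int) (cs : List Int) (bal : Int)
    (h : ∀ o ∈ opens, c < o) :
    pvMerge t opens (c :: cs) bal
      = if bal = 0 then
          some [String.ofList (PySem.List.slice t none (some (c - 1))),
                String.ofList (PySem.List.slice t (some c) none)]
        else pvMerge t opens cs (bal - 1) := by
  cases opens with
  | nil => rw [pvMerge]
  | cons o os =>
    have hlt := h o List.mem_cons_self
    rw [pvMerge, if_neg (by omega)]

-- core correspondence: A's scan from position s equals B's merge of the remaining indices
lemma pv_scan_eq_merge (e t : List Char) (M : Nat) :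
    ∀ n s occ, s + n = M →
      pvALoop e t ((List.range' s n).map (fun (i : Nat) => (i : Int))) occ
        = pvMerge t
            (((List.range' s n).filter (fun i => ('<' :: e).isPrefixOf (t.drop i))).map (fun (i : Nat) => (i : Int)))
            (((List.range' s n).filter (fun i => ('<' :: '/' :: e).isPrefixOf (t.drop i))).map (fun (i : Nat) => (i : Int)))
            occ := by
  intro n
  induction n with
  | zero => intro s occ _; simp [pvALoop, pvMerge]
  | succ n ih =>
    intro s occ hsM
    have hcast1 : ((e.length : Int) + 1) = ((('<' :: e).length : Nat) : Int) := by
      push_cast [List.length_cons]; ring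
    have hcast2 : ((e.length : Int) + 2) = ((('<' :: '/' :: e).length : Nat) : Int) := by
      push_cast [List.length_cons]; ring
    have hge : ∀ p : List Char, ∀ x ∈ ((List.range' (s+1) n).filter
        (fun i => p.isPrefixOf (t.drop i))).map (fun (i : Nat) => (i : Int)), (s : Int) < x := by
      intro p x hx
      obtain ⟨i, hi, rfl⟩ := List.mem_map.mp hx
      have := List.mem_range'_1.mp (List.mem_of_mem_filter hi)
      omega
    rw [List.range'_succ]
    by_cases hopen : ('<' :: e).isPrefixOf (t.drop s) = true
    · -- A takes the open branch
      rw [List.map_cons, pvALoop,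
        if_pos (hcast1 ▸ (pv_slice_eq_iff_prefix ('<' :: e) t s).mpr hopen),
        ih (s + 1) (occ + 1) (by omega)]
      by_cases hclose : ('<' :: '/' :: e).isPrefixOf (t.drop s) = true
      · -- position is in both lists: the merge tie consumes both heads
        rw [List.filter_cons, if_pos hopen, List.filter_cons, if_pos hclose,
          List.map_cons, List.map_cons, pvMerge, if_pos (le_refl _), if_pos rfl]
      · rw [List.filter_cons, if_pos hopen, List.filter_cons, if_neg hclose,
          List.map_cons, pv_merge_skip_open _ _ _ _ _ (hge _)]
    · rw [List.map_cons, pvALoop, if_neg (by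
        rw [hcast1, pv_slice_eq_iff_prefix]; exact hopen)]
      by_cases hclose : ('<' :: '/' :: e).isPrefixOf (t.drop s) = true
      · -- A takes the close branch; merge sees the close head below every open position
        rw [if_pos (hcast2 ▸ (pv_slice_eq_iff_prefix ('<' :: '/' :: e) t s).mpr hclose),
          List.filter_cons, if_neg hopen, List.filter_cons, if_pos hclose,
          List.map_cons, pv_merge_close _ _ _ _ _ (hge _)]
        by_cases hocc : occ = 0
        · rw [if_pos hocc, if_pos hocc]
        · rw [if_neg hocc, if_neg hocc, ih (s + 1) (occ - 1) (by omega)]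
      · rw [if_neg (by rw [hcast2, pv_slice_eq_iff_prefix]; exact hclose),
          List.filter_cons, if_neg hopen, List.filter_cons, if_neg hclose,
          ih (s + 1) occ (by omega)]

-- ===== VERDICT (by name: the statement is the Claim_ definition above) =====
theorem htmlParser_spec : Claim_equal_htmlParser := by
  intro enc text _
  unfold Spec_htmlParser htmlParser htmlParser_alt
  by_cases ht : text.toList = []
  · -- empty text: both loops are trivial
    rw [ht]
    have hfind : ∀ c cs, pvFindAll [] (c :: cs) ((-1 : Int)) = [] := by
      intro c cs
      have : PySem.Chars.find [] (c :: cs) = -1 := by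
        rw [PySem.Chars.find_eq_neg_one_iff]
        simp
      simp [pvFindAll, this, pvFindAllGo]
    simp [hfind, pvMerge, pvALoop, PySem.List.pyRange]
  · have hlen : 0 < text.toList.length := List.length_pos_iff.mpr ht
    have h1 : ((text.toList.length : Int) - 1) = ((text.toList.length - 1 : Nat) : Int) := by omega
    rw [pv_findAll_spec _ _ (by simp) ht, pv_findAll_spec _ _ (by simp) ht, h1,
      PySem.List.pyRange_zero_natCast, List.range_eq_range',
      pv_scan_eq_merge enc.toList text.toList (text.toList.length - 1) (text.toList.length - 1) 0 0 (by omega)]
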